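-- pv_equiv track=rewrite | github.com/WhiteMagic3333/CP-Algo | Code/Resources/templates/Generic_Template/A_.py | query_game
-- ===== SOURCE A (Python) =====
-- def update_query(arr, rev, i, j):
--     """
--     Swaps elements at positions i and j in the main array (arr)
--     and its reverse counterpart (rev).
--     """
--     n = len(arr)
--     rev_i = n - i - 1
--     rev_j = n - j - 1
--     arr[i], arr[j] = arr[j], arr[i]
--     rev[rev_i], rev[rev_j] = rev[rev_j], rev[rev_i]
--
-- def query_game(N, A, Q, P):
--     """
--     Processes queries on array A with efficient handling of reverse and swaps.
--     """
--     rev = A[::-1]  # Reverse array as a shadow copy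
--     is_reversed = False  # Tracks if the array is logically reversed
--     results = []
--
--     for query in P:
--         op = query[0]
--         if op == 1:
--             # Toggle the reversed state
--             is_reversed = not is_reversed
--
--         elif op == 2:
--             # Swap elements at positions i and j
--             _, i, j = query
--             i -= 1  # Convert to 0-based index
--             j -= 1
--             if is_reversed:
--                 update_query(rev, A, i, j)
--             else:
--                 update_query(A, rev, i, j)
--
--         elif op == 3:
--             # Output the element at position i
--             _, i = query
--             i -= 1  # Convert to 0-based index
--             if is_reversed:
--                 results.append(rev[i])
--             else:
--                 results.append(A[i])
--
--     return results
-- ===== SOURCE B (Python) =====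
-- def query_game(N, A, Q, P):
--     """Eager strategy: no shadow array, no is_reversed flag, no index mirroring.
--     Keep the logical array explicitly and physically reverse it on every op 1;
--     swaps and reads then act directly. Does not mutate A (works on a copy):
--     equivalence with the original is about the return value."""
--     cur = list(A)
--     out = []
--     for q in P:
--         op = q[0]
--         if op == 1:
--             cur = cur[::-1]
--         elif op == 2:
--             _, i, j = q
--             i -= 1
--             j -= 1
--             cur[i], cur[j] = cur[j], cur[i]
--         elif op == 3:
--             _, i = q
--             out.append(cur[i - 1])
--     return out
-- ===== Notes on version B (the rewrite author's own statement) =====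
-- stated objective: simpler
-- what changed: B discards the whole lazy-reversal machinery (shadow reversed array, is_reversed flag, index mirroring and the swap helper): it keeps the logical array explicitly and physically reverses it on each op 1, so swaps and reads are direct; it works on a copy and does not mutate A.
import Mathlib
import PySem

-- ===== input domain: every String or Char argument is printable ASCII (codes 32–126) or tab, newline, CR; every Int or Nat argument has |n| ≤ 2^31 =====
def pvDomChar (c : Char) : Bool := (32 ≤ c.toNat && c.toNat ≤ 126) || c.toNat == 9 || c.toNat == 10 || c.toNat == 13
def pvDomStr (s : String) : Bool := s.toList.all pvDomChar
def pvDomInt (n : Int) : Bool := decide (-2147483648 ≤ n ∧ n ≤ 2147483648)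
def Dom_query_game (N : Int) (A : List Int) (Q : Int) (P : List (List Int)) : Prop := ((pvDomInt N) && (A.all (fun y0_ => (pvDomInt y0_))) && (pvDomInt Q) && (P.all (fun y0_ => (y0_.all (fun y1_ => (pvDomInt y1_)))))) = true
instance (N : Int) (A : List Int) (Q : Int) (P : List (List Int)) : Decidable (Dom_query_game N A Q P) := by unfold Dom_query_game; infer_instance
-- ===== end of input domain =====

-- B replaces A's lazy-reversal machinery (shadow reversed array + is_reversed flag + index
-- mirroring) by the eager strategy: it keeps the logical array and physically reverses it on
-- each op 1. B works on a copy, so equivalence is about the return value only (A mutates A).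

-- ===== PORT A =====
-- update_query(arr, rev, i, j): swap arr[i],arr[j] and the mirrored pair in rev; returns (arr', rev')
def qgUpdate (arr rev : List Int) (i j : Int) : List Int × List Int :=
  let n : Int := arr.length
  let rev_i := n - i - 1
  let rev_j := n - j - 1
  let aj := PySem.List.pyGetD arr j 0
  let ai := PySem.List.pyGetD arr i 0
  let arr' := PySem.List.pySetD (PySem.List.pySetD arr i aj) j ai
  let rj := PySem.List.pyGetD rev rev_j 0
  let ri := PySem.List.pyGetD rev rev_i 0
  let rev' := PySem.List.pySetD (PySem.List.pySetD rev rev_i rj) rev_j ri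
  (arr', rev')

-- one iteration of A's loop; state = (A, rev, is_reversed, results)
def qgStepA (s : List Int × List Int × Bool × List Int) (q : List Int) :
    List Int × List Int × Bool × List Int :=
  match s with
  | (arr, rev, flag, res) =>
    let op := PySem.List.pyGetD q 0 0
    if op = 1 then (arr, rev, !flag, res)
    else if op = 2 then
      let i := PySem.List.pyGetD q 1 0 - 1
      let j := PySem.List.pyGetD q 2 0 - 1
      if flag then
        let p := qgUpdate rev arr i j
        (p.2, p.1, flag, res)
      else
        let p := qgUpdate arr rev i j
        (p.1, p.2, flag, res)
    else if op = 3 then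
      let i := PySem.List.pyGetD q 1 0 - 1
      (arr, rev, flag,
        res ++ [if flag then PySem.List.pyGetD rev i 0 else PySem.List.pyGetD arr i 0])
    else (arr, rev, flag, res)

def query_game (N : Int) (A : List Int) (Q : Int) (P : List (List Int)) : List Int :=
  let rev := (PySem.List.slice? A none none (-1)).getD []   -- A[::-1]
  let st := P.foldl qgStepA (A, rev, false, [])
  st.2.2.2

-- ===== PORT B =====
-- one iteration of B's loop; state = (cur, out): the logical array and the results so far
def qgStepC (s : List Int × List Int) (q : List Int) : List Int × List Int :=
  match s with
  | (cur, out) =>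
    let op := PySem.List.pyGetD q 0 0
    if op = 1 then ((PySem.List.slice? cur none none (-1)).getD cur, out)   -- cur[::-1]
    else if op = 2 then
      let i := PySem.List.pyGetD q 1 0 - 1
      let j := PySem.List.pyGetD q 2 0 - 1
      (PySem.List.pySetD (PySem.List.pySetD cur i (PySem.List.pyGetD cur j 0)) j
        (PySem.List.pyGetD cur i 0), out)
    else if op = 3 then
      let i := PySem.List.pyGetD q 1 0 - 1
      (cur, out ++ [PySem.List.pyGetD cur i 0])
    else (cur, out)

def query_game_alt (N : Int) (A : List Int) (Q : Int) (P : List (List Int)) : List Int :=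
  (P.foldl qgStepC (A, [])).2

-- ===== PRECONDITION & SPEC =====
-- Pre_ admits exactly the inputs on which the Python A returns normally: every query is
-- nonempty; an op-2 query has exact arity 3 (otherwise ValueError on unpacking) and 1-based
-- indices in 1..len(A) (any index outside raises IndexError, directly or through the shadow
-- array's mirrored position); an op-3 query has exact arity 2 and a 1-based index in
-- 1-len(A)..len(A), the range Python's indexing (with negative wraparound) accepts.
def Pre_query_game (N : Int) (A : List Int) (Q : Int) (P : List (List Int)) : Prop :=
  ∀ q ∈ P, q ≠ [] ∧
    (PySem.List.pyGetD q 0 0 = 2 →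
      q.length = 3 ∧
      1 ≤ PySem.List.pyGetD q 1 0 ∧ PySem.List.pyGetD q 1 0 ≤ (A.length : Int) ∧
      1 ≤ PySem.List.pyGetD q 2 0 ∧ PySem.List.pyGetD q 2 0 ≤ (A.length : Int)) ∧
    (PySem.List.pyGetD q 0 0 = 3 →
      q.length = 2 ∧
      1 - (A.length : Int) ≤ PySem.List.pyGetD q 1 0 ∧
      PySem.List.pyGetD q 1 0 ≤ (A.length : Int))
instance (N : Int) (A : List Int) (Q : Int) (P : List (List Int)) : Decidable (Pre_query_game N A Q P) := by unfold Pre_query_game; infer_instance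

def pvWitness_query_game : Int × List Int × Int × List (List Int) :=
  (3, [5, 7, 9], 4, [[3, 1], [1], [2, 1, 3], [3, 2]])

def Spec_query_game (N : Int) (A : List Int) (Q : Int) (P : List (List Int)) (out : List Int) : Prop := out = query_game_alt N A Q P
instance (N : Int) (A : List Int) (Q : Int) (P : List (List Int)) (out : List Int) : Decidable (Spec_query_game N A Q P out) := by unfold Spec_query_game; infer_instance

-- ===== CLAIM (what is proved, stated in full; the proofs are below) =====
def Claim_equal_query_game : Prop := ∀ (N : Int) (A : List Int) (Q : Int) (P : List (List Int)), Dom_query_game N A Q P → Pre_query_game N A Q P → Spec_query_game N A Q P (query_game N A Q P)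

-- ===== LEMMAS AND PROOFS =====

-- setting position k in xs is setting the mirrored position in xs.reverse
theorem qg_set_reverse (xs : List Int) (k : Nat) (hk : k < xs.length) (a : Int) :
    (xs.set k a).reverse = xs.reverse.set (xs.length - 1 - k) a := by
  apply List.ext_getElem
  · simp
  · intro i h1 h2
    simp only [List.length_reverse, List.length_set] at h1 h2
    rw [List.getElem_reverse, List.getElem_set, List.getElem_set, List.getElem_reverse]
    simp only [List.length_set]
    by_cases h : k = xs.length - 1 - i
    · simp [h, show xs.length - 1 - (xs.length - 1 - i) = i by omega]
    · have : xs.length - 1 - k ≠ i := by omega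
      simp [h, this]

-- mirrored swap on the reverse list (Nat indices)
theorem qg_swap_rev_nat (xs : List Int) (ki kj : Nat) (hi : ki < xs.length) (hj : kj < xs.length) :
    (xs.reverse.set (xs.length-1-ki) (xs.reverse.getD (xs.length-1-kj) 0)).set (xs.length-1-kj)
      (xs.reverse.getD (xs.length-1-ki) 0)
    = ((xs.set ki (xs.getD kj 0)).set kj (xs.getD ki 0)).reverse := by
  have g1 : xs.reverse.getD (xs.length-1-kj) 0 = xs.getD kj 0 := by
    rw [List.getD_eq_getElem _ _ (by simp; omega), List.getD_eq_getElem _ _ hj,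
      List.getElem_reverse]
    congr 1; omega
  have g2 : xs.reverse.getD (xs.length-1-ki) 0 = xs.getD ki 0 := by
    rw [List.getD_eq_getElem _ _ (by simp; omega), List.getD_eq_getElem _ _ hi,
      List.getElem_reverse]
    congr 1; omega
  rw [g1, g2, qg_set_reverse _ kj (by simp [hj]), qg_set_reverse _ ki hi]
  simp

-- the relation between A's 4-part lazy state and B's 2-part eager state:
-- the canonical/shadow pair is (cur, cur.reverse) or (cur.reverse, cur) according to the flag
def qgRel (n0 : Nat) (sA : List Int × List Int × Bool × List Int)
    (sC : List Int × List Int) : Prop :=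
  (sA.2.2.1 = true → sA.2.1 = sC.1 ∧ sA.1 = sC.1.reverse) ∧
  (sA.2.2.1 = false → sA.1 = sC.1 ∧ sA.2.1 = sC.1.reverse) ∧
  sA.2.2.2 = sC.2 ∧ sC.1.length = n0

theorem qg_step_rel (n0 : Nat) (sA : List Int × List Int × Bool × List Int)
    (sC : List Int × List Int) (q : List Int)
    (hrel : qgRel n0 sA sC)
    (hq : PySem.List.pyGetD q 0 0 = 2 →
        1 ≤ PySem.List.pyGetD q 1 0 ∧ PySem.List.pyGetD q 1 0 ≤ (n0 : Int) ∧
        1 ≤ PySem.List.pyGetD q 2 0 ∧ PySem.List.pyGetD q 2 0 ≤ (n0 : Int)) :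
    qgRel n0 (qgStepA sA q) (qgStepC sC q) := by
  obtain ⟨arr, rev, flag, res⟩ := sA
  obtain ⟨cur, out⟩ := sC
  obtain ⟨ht, hf, hres, hlen⟩ := hrel
  simp only at ht hf hres hlen
  subst hres
  by_cases hop1 : PySem.List.pyGetD q 0 0 = 1
  · cases flag with
    | false =>
      obtain ⟨h1, h2⟩ := hf rfl; subst h1 h2
      simp [qgStepA, qgStepC, qgRel, hop1, PySem.List.slice?_none_none_neg_one, hlen]
    | true =>
      obtain ⟨h1, h2⟩ := ht rfl; subst h1 h2
      simp [qgStepA, qgStepC, qgRel, hop1, PySem.List.slice?_none_none_neg_one, hlen]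
  by_cases hop2 : PySem.List.pyGetD q 0 0 = 2
  · obtain ⟨hi1, hi2, hj1, hj2⟩ := hq hop2
    obtain ⟨ki, hki, hkilt⟩ : ∃ k : Nat, PySem.List.pyGetD q 1 0 - 1 = (k : Int) ∧
        k < cur.length := ⟨(PySem.List.pyGetD q 1 0 - 1).toNat, by omega, by omega⟩
    obtain ⟨kj, hkj, hkjlt⟩ : ∃ k : Nat, PySem.List.pyGetD q 2 0 - 1 = (k : Int) ∧
        k < cur.length := ⟨(PySem.List.pyGetD q 2 0 - 1).toNat, by omega, by omega⟩
    cases flag with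
    | false =>
      obtain ⟨h1, h2⟩ := hf rfl; subst h1 h2
      have hki' : ki < n0 := hlen ▸ hkilt
      have hkj' : kj < n0 := hlen ▸ hkjlt
      have ei : ((n0 : Int) - (ki : Int) - 1) = ((n0 - 1 - ki : Nat) : Int) := by omega
      have ej : ((n0 : Int) - (kj : Int) - 1) = ((n0 - 1 - kj : Nat) : Int) := by omega
      simp [qgRel, qgStepA, qgStepC, qgUpdate, hop2, hki, hkj, ei, ej, hlen]
      simp only [← List.getD_eq_getElem?_getD]
      have hsw := qg_swap_rev_nat arr ki kj hkilt hkjlt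
      rw [hlen] at hsw
      exact hsw
    | true =>
      obtain ⟨h1, h2⟩ := ht rfl; subst h1 h2
      have hki' : ki < n0 := hlen ▸ hkilt
      have hkj' : kj < n0 := hlen ▸ hkjlt
      have ei : ((n0 : Int) - (ki : Int) - 1) = ((n0 - 1 - ki : Nat) : Int) := by omega
      have ej : ((n0 : Int) - (kj : Int) - 1) = ((n0 - 1 - kj : Nat) : Int) := by omega
      simp [qgRel, qgStepA, qgStepC, qgUpdate, hop2, hki, hkj, ei, ej, hlen]
      simp only [← List.getD_eq_getElem?_getD]
      have hsw := qg_swap_rev_nat rev ki kj hkilt hkjlt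
      rw [hlen] at hsw
      exact hsw
  by_cases hop3 : PySem.List.pyGetD q 0 0 = 3
  · cases flag with
    | false =>
      obtain ⟨h1, h2⟩ := hf rfl; subst h1 h2
      simp [qgStepA, qgStepC, qgRel, hop1, hop2, hop3, hlen]
    | true =>
      obtain ⟨h1, h2⟩ := ht rfl; subst h1 h2
      simp [qgStepA, qgStepC, qgRel, hop1, hop2, hop3, hlen]
  · cases flag with
    | false =>
      obtain ⟨h1, h2⟩ := hf rfl; subst h1 h2
      simp [qgStepA, qgStepC, qgRel, hop1, hop2, hop3, hlen]
    | true =>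
      obtain ⟨h1, h2⟩ := ht rfl; subst h1 h2
      simp [qgStepA, qgStepC, qgRel, hop1, hop2, hop3, hlen]

theorem qg_fold_rel (n0 : Nat) (P : List (List Int))
    (hP : ∀ q ∈ P, PySem.List.pyGetD q 0 0 = 2 →
        1 ≤ PySem.List.pyGetD q 1 0 ∧ PySem.List.pyGetD q 1 0 ≤ (n0 : Int) ∧
        1 ≤ PySem.List.pyGetD q 2 0 ∧ PySem.List.pyGetD q 2 0 ≤ (n0 : Int))
    (sA : List Int × List Int × Bool × List Int) (sC : List Int × List Int)
    (hrel : qgRel n0 sA sC) :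
    qgRel n0 (P.foldl qgStepA sA) (P.foldl qgStepC sC) := by
  induction P generalizing sA sC with
  | nil => simpa
  | cons q P ih =>
    simp only [List.foldl_cons]
    exact ih (fun r hr => hP r (List.mem_cons_of_mem _ hr)) _ _
      (qg_step_rel n0 sA sC q hrel (hP q List.mem_cons_self))

-- ===== VERDICT (by name: the statement is the Claim_ definition above) =====
theorem query_game_spec : Claim_equal_query_game := by
  intro N A Q P _ hpre
  unfold Spec_query_game query_game query_game_alt
  simp only [PySem.List.slice?_none_none_neg_one, Option.getD_some]
  have hrel0 : qgRel A.length (A, A.reverse, false, []) (A, []) := by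
    simp [qgRel]
  obtain ⟨-, -, hres, -⟩ := qg_fold_rel A.length P
    (fun q hq h2 => ((hpre q hq).2.1 h2).2) (A, A.reverse, false, []) (A, []) hrel0
  exact hres
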